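-- pv_equiv track=rewrite | github.com/umtdg/cs115-2019-2020-summer | lab4/doc_module.py | get_field
-- ===== SOURCE A (Python) =====
-- def get_field(line, delim="\t", is_begin=True):
--     """ Tokenize the line and returns the first token if
--     parameter is_begin is true, returns the last token otherwise.
--
--     :param line: The line string to tokenize
--     :param delim: Delimiter to split tokens. Default is \t
--     :param is_begin: Determine whether the first or the last token will be
--         returned
--
--     :return: Returns either the first or the last token depending on parameter
--         is_begin
--     """
--
--     token = ""
--     for c in line:
--         if c != delim:
--             token += c
--         else:
--             # Return first token if is_begin is true
--             if is_begin:
--                 return token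
--             # If not, then continue to the next
--             token = ""
--
--     # Return the last token
--     return token
-- ===== SOURCE B (Python) =====
-- def get_field(line, delim="\t", is_begin=True):
--     if is_begin:
--         out = []
--         for c in line:
--             if c == delim:
--                 break
--             out.append(c)
--         return "".join(out)
--     out = []
--     for c in reversed(line):
--         if c == delim:
--             break
--         out.append(c)
--     return "".join(reversed(out))
-- ===== Notes on version B (the rewrite author's own statement) =====
-- stated objective: alternative
-- what changed: Replaces A's single forward pass with an accumulate-and-reset token buffer by two direction-specific early-break scans: forward collect-until-delimiter for the first token, reversed collect-until-delimiter (then reversed back) for the last token, keeping the char-vs-delim comparison so multi-character delimiters still yield the whole line.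
import Mathlib
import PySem

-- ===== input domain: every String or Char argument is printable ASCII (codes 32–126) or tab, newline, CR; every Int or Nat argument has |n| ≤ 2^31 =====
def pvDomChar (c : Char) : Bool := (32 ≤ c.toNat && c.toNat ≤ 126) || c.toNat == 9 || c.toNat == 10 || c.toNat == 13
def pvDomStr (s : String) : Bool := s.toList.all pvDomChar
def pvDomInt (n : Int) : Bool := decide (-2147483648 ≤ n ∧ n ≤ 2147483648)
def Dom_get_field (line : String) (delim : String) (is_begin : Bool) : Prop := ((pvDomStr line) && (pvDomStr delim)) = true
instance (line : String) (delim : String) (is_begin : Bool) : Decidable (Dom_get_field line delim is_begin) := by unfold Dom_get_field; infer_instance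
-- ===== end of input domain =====

-- B rewrites A's accumulate-and-reset forward pass as two direction-specific early-break scans (alternative decomposition, same cost).

-- ===== PORT A =====
-- A's loop: token accumulator, reset on delimiter; `c != delim` compares a 1-char string with delim.
def pvLoopA (delim : String) (is_begin : Bool) : List Char → List Char → List Char
  | [], token => token
  | c :: cs, token =>
    if String.singleton c ≠ delim then pvLoopA delim is_begin cs (token ++ [c])
    else if is_begin then token
    else pvLoopA delim is_begin cs []

def get_field (line : String) (delim : String) (is_begin : Bool) : String :=
  String.mk (pvLoopA delim is_begin line.toList [])

-- ===== PORT B =====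
-- B's scan: collect characters until one equals delim (early break), no accumulator reset.
def pvScanB (delim : String) : List Char → List Char
  | [] => []
  | c :: cs => if String.singleton c = delim then [] else c :: pvScanB delim cs

def get_field_alt (line : String) (delim : String) (is_begin : Bool) : String :=
  if is_begin then String.mk (pvScanB delim line.toList)
  else String.mk ((pvScanB delim line.toList.reverse).reverse)

-- ===== PRECONDITION & SPEC =====
def Spec_get_field (line : String) (delim : String) (is_begin : Bool) (out : String) : Prop := out = get_field_alt line delim is_begin
instance (line : String) (delim : String) (is_begin : Bool) (out : String) : Decidable (Spec_get_field line delim is_begin out) := by unfold Spec_get_field; infer_instance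

-- ===== CLAIM (what is proved, stated in full; the proofs are below) =====
def Claim_equal_get_field : Prop := ∀ (line : String) (delim : String) (is_begin : Bool), Dom_get_field line delim is_begin → Spec_get_field line delim is_begin (get_field line delim is_begin)

-- ===== LEMMAS AND PROOFS =====

def pvAllq (delim : String) (l : List Char) : Bool := l.all (fun c => !(String.singleton c == delim))

theorem pvScanB_eq_self (delim : String) (l : List Char) (h : pvAllq delim l = true) :
    pvScanB delim l = l := by
  induction l with
  | nil => rfl
  | cons c cs ih =>
    simp only [pvAllq, List.all_cons, Bool.and_eq_true] at h
    have hcs : pvAllq delim cs = true := by simpa [pvAllq] using h.2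
    simp [pvScanB, (by simpa using h.1 : ¬ String.singleton c = delim), ih hcs]

theorem pvScanB_append_stop (delim : String) (l l' : List Char) (h : pvAllq delim l = false) :
    pvScanB delim (l ++ l') = pvScanB delim l := by
  induction l with
  | nil => simp [pvAllq] at h
  | cons c cs ih =>
    by_cases hc : String.singleton c = delim
    · simp [pvScanB, hc]
    · simp [pvAllq, List.all_cons, hc] at h
      simp [pvScanB, hc, ih (by simpa [pvAllq] using h)]

theorem pvScanB_append_all (delim : String) (l l' : List Char) (h : pvAllq delim l = true) :
    pvScanB delim (l ++ l') = l ++ pvScanB delim l' := by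
  induction l with
  | nil => rfl
  | cons c cs ih =>
    simp only [pvAllq, List.all_cons, Bool.and_eq_true] at h
    have hcs : pvAllq delim cs = true := by simpa [pvAllq] using h.2
    simp [pvScanB, (by simpa using h.1 : ¬ String.singleton c = delim), ih hcs]

theorem pvAllq_reverse (delim : String) (l : List Char) :
    pvAllq delim l.reverse = pvAllq delim l := by
  simp [pvAllq]

theorem pvLoopA_true (delim : String) (l token : List Char) :
    pvLoopA delim true l token = token ++ pvScanB delim l := by
  induction l generalizing token with
  | nil => simp [pvLoopA, pvScanB]
  | cons c cs ih =>
    by_cases hc : String.singleton c = delim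
    · simp [pvLoopA, pvScanB, hc]
    · simp [pvLoopA, pvScanB, hc, ih]

theorem pvLoopA_false (delim : String) (l token : List Char) :
    pvLoopA delim false l token =
      if pvAllq delim l then token ++ l else (pvScanB delim l.reverse).reverse := by
  induction l generalizing token with
  | nil => simp [pvLoopA, pvAllq]
  | cons c cs ih =>
    by_cases hc : String.singleton c = delim
    · -- delimiter hit: token resets
      have hstep : pvLoopA delim false (c :: cs) token = pvLoopA delim false cs [] := by
        simp [pvLoopA, hc]
      rw [hstep, ih]
      have hall : pvAllq delim (c :: cs) = false := by simp [pvAllq, hc]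
      rw [hall]
      simp only [Bool.false_eq_true, if_false]
      by_cases hcs : pvAllq delim cs = true
      · rw [if_pos hcs, List.nil_append, List.reverse_cons,
          pvScanB_append_all delim _ _ (by rw [pvAllq_reverse]; exact hcs)]
        simp [pvScanB, hc]
      · rw [if_neg (by simpa using hcs), List.reverse_cons,
          pvScanB_append_stop delim _ _ (by rw [pvAllq_reverse]; simpa using hcs)]
    · have hstep : pvLoopA delim false (c :: cs) token = pvLoopA delim false cs (token ++ [c]) := by
        simp [pvLoopA, hc]
      rw [hstep, ih]
      have hall : pvAllq delim (c :: cs) = pvAllq delim cs := by simp [pvAllq, hc]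
      rw [hall]
      by_cases hcs : pvAllq delim cs = true
      · simp [hcs]
      · rw [if_neg (by simpa using hcs), if_neg (by simpa using hcs), List.reverse_cons,
          pvScanB_append_stop delim _ _ (by rw [pvAllq_reverse]; simpa using hcs)]

-- ===== VERDICT (by name: the statement is the Claim_ definition above) =====
theorem get_field_spec : Claim_equal_get_field := by
  intro line delim is_begin _
  unfold Spec_get_field get_field get_field_alt
  cases is_begin with
  | true => simp [pvLoopA_true]
  | false =>
    simp only [Bool.false_eq_true, if_false]
    rw [pvLoopA_false]
    by_cases h : pvAllq delim line.toList = true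
    · rw [if_pos h, List.nil_append,
        pvScanB_eq_self delim _ (by rw [pvAllq_reverse]; exact h), List.reverse_reverse]
    · rw [if_neg (by simpa using h)]
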